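-- pv_equiv track=rewrite | github.com/balarooty/tony | scripts/predict_match_outcome.py | choose_surface_row
-- ===== SOURCE A (Python) =====
-- from typing import Dict, List, Optional, Tuple
--
-- def choose_surface_row(rows: List[Dict[str, str]], surface: str) -> Optional[Dict[str, str]]:
--     if not rows:
--         return None
--
--     target = surface.strip().lower()
--     for row in rows:
--         split = str(row.get("Split", "")).strip().lower()
--         if split == target:
--             return row
--
--     # Fallback to common rows if specific surface isn't available.
--     priority = ["hard", "clay", "grass", "best of 3", "best of 5"]
--     for split_name in priority:
--         for row in rows:
--             split = str(row.get("Split", "")).strip().lower()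
--             if split == split_name:
--                 return row
--
--     return rows[0]
-- ===== SOURCE B (Python) =====
-- def choose_surface_row(rows, surface):
--     if not rows:
--         return None
--     target = surface.strip().lower()
--
--     def rank(row):
--         split = str(row.get("Split", "")).strip().lower()
--         if split == target:
--             return 0
--         if split == "hard":
--             return 1
--         if split == "clay":
--             return 2
--         if split == "grass":
--             return 3
--         if split == "best of 3":
--             return 4
--         if split == "best of 5":
--             return 5
--         return 6
--
--     best = rows[0]
--     best_rank = rank(best)
--     for row in rows[1:]:
--         r = rank(row)
--         if r < best_rank:
--             best = row
--             best_rank = r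
--     return best
-- ===== Notes on version B (the rewrite author's own statement) =====
-- stated objective: alternative
-- what changed: Replaces A's staged scans (one scan for the target, then one full scan per priority name, then rows[0]) with a single pass computing a numeric rank per row (0=target, 1-5=priority order, 6=other) and keeping the first row with the minimal rank.
import Mathlib
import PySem

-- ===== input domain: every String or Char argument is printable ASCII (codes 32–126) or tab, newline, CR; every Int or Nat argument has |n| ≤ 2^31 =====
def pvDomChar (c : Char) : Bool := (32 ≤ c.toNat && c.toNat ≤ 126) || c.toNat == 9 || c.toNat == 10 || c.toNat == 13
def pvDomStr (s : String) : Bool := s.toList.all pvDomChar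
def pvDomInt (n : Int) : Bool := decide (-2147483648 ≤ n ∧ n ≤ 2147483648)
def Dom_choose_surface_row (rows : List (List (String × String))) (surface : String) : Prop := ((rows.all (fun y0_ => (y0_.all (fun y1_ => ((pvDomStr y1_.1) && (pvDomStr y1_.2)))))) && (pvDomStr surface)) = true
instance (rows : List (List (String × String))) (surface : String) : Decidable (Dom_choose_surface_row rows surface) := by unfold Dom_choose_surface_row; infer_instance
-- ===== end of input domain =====

-- B replaces A's staged scans (target scan, then one scan per priority name, then rows[0])
-- by a single pass keeping the first row of minimal numeric rank (alternative algorithm).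

-- ===== PORT A =====
-- str(row.get("Split", "")).strip().lower()
def pvNormA (row : List (String × String)) : String :=
  PySem.Str.lower (PySem.Str.strip ((PySem.Dict.mk row).getD "Split" ""))

-- A's 'for row in rows: if split == t: return row' scan
def pvFindSplit (t : String) : List (List (String × String)) → Option (List (String × String))
  | [] => none
  | r :: rs => if pvNormA r = t then some r else pvFindSplit t rs

-- A's outer loop over the priority names, each doing a full scan
def pvPrioLoop (rows : List (List (String × String))) : List String → Option (List (String × String))
  | [] => none
  | n :: ns =>
    match pvFindSplit n rows with
    | some r => some r
    | none => pvPrioLoop rows ns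

def choose_surface_row (rows : List (List (String × String))) (surface : String) : Option (List (String × String)) :=
  if rows = [] then none
  else
    let target := PySem.Str.lower (PySem.Str.strip surface)
    match pvFindSplit target rows with
    | some r => some r
    | none =>
      match pvPrioLoop rows ["hard", "clay", "grass", "best of 3", "best of 5"] with
      | some r => some r
      | none => rows.head?

-- ===== PORT B =====
-- B's rank(row): 0 for the target surface, 1-5 for the priority names, 6 otherwise
def pvNormB (row : List (String × String)) : String :=
  PySem.Str.lower (PySem.Str.strip ((PySem.Dict.mk row).getD "Split" ""))

def pvRank (target : String) (row : List (String × String)) : Nat :=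
  if pvNormB row = target then 0
  else if pvNormB row = "hard" then 1
  else if pvNormB row = "clay" then 2
  else if pvNormB row = "grass" then 3
  else if pvNormB row = "best of 3" then 4
  else if pvNormB row = "best of 5" then 5
  else 6

-- B's single pass: keep the first row with the (strictly) smallest rank
def choose_surface_row_alt (rows : List (List (String × String))) (surface : String) : Option (List (String × String)) :=
  match rows with
  | [] => none
  | b :: rest =>
    let target := PySem.Str.lower (PySem.Str.strip surface)
    some ((rest.foldl
        (fun acc row =>
          let r := pvRank target row
          if r < acc.2 then (row, r) else acc)
        (b, pvRank target b)).1)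

-- ===== PRECONDITION & SPEC =====
def Spec_choose_surface_row (rows : List (List (String × String))) (surface : String) (out : Option (List (String × String))) : Prop := out = choose_surface_row_alt rows surface
instance (rows : List (List (String × String))) (surface : String) (out : Option (List (String × String))) : Decidable (Spec_choose_surface_row rows surface out) := by unfold Spec_choose_surface_row; infer_instance

-- ===== CLAIM (what is proved, stated in full; the proofs are below) =====
def Claim_equal_choose_surface_row : Prop := ∀ (rows : List (List (String × String))) (surface : String), Dom_choose_surface_row rows surface → Spec_choose_surface_row rows surface (choose_surface_row rows surface)

-- ===== LEMMAS AND PROOFS =====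

-- minimum of f over a list (7 = empty); f is kept abstract
def pvMinF {α : Type} (f : α → Nat) (l : List α) : Nat :=
  l.foldr (fun a acc => min (f a) acc) 7

-- minimum rank over a list (7 = empty)
def pvMinR (t : String) (l : List (List (String × String))) : Nat :=
  pvMinF (pvRank t) l

theorem pvRank_le (t : String) (r : List (String × String)) : pvRank t r ≤ 6 := by
  unfold pvRank; split_ifs <;> omega

theorem pvMinF_cons {α : Type} (f : α → Nat) (a : α) (l : List α) :
    pvMinF f (a :: l) = min (f a) (pvMinF f l) := rfl

theorem pvMinF_le_of_mem {α : Type} {f : α → Nat} {l : List α} {a : α} (h : a ∈ l) :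
    pvMinF f l ≤ f a := by
  induction l with
  | nil => cases h
  | cons x xs ih =>
    rcases List.mem_cons.mp h with h | h
    · subst h; exact Nat.min_le_left _ _
    · exact le_trans (Nat.min_le_right _ _) (ih h)

theorem pvMinF_mem {α : Type} {f : α → Nat} (hf : ∀ a, f a ≤ 6) {l : List α} (h : l ≠ []) :
    ∃ a ∈ l, f a = pvMinF f l := by
  induction l with
  | nil => exact absurd rfl h
  | cons x xs ih =>
    cases xs with
    | nil =>
      refine ⟨x, List.mem_cons_self, ?_⟩
      have := hf x
      simp only [pvMinF, List.foldr]
      omega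
    | cons y ys =>
      obtain ⟨r, hr, hrk⟩ := ih (by simp)
      by_cases hx : f x ≤ pvMinF f (y :: ys)
      · refine ⟨x, List.mem_cons_self, ?_⟩
        simp only [pvMinF, List.foldr] at *
        omega
      · refine ⟨r, List.mem_cons_of_mem _ hr, ?_⟩
        simp only [pvMinF, List.foldr] at *
        omega

theorem pvMinR_le_of_mem {t : String} {l : List (List (String × String))}
    {r : List (String × String)} (h : r ∈ l) : pvMinR t l ≤ pvRank t r :=
  pvMinF_le_of_mem h

theorem pvMinR_mem {t : String} {l : List (List (String × String))} (h : l ≠ []) :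
    ∃ r ∈ l, pvRank t r = pvMinR t l :=
  pvMinF_mem (pvRank_le t) h

theorem pvFindSplit_eq_find? (t : String) (l : List (List (String × String))) :
    pvFindSplit t l = l.find? (fun r => decide (pvNormA r = t)) := by
  induction l with
  | nil => rfl
  | cons x xs ih =>
    simp only [pvFindSplit, List.find?]
    by_cases h : pvNormA x = t
    · simp [h]
    · simp [h, ih]

theorem find?_congr_mem {α : Type} {p q : α → Bool} :
    ∀ (l : List α), (∀ a ∈ l, p a = q a) → l.find? p = l.find? q
  | [], _ => rfl
  | x :: xs, h => by
    simp only [List.find?, h x List.mem_cons_self]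
    cases q x with
    | true => rfl
    | false => exact find?_congr_mem xs (fun a ha => h a (List.mem_cons_of_mem _ ha))

theorem pvRank_zero_iff (t : String) (r : List (String × String)) :
    pvRank t r = 0 ↔ pvNormA r = t := by
  unfold pvRank pvNormB pvNormA; split_ifs with h <;> simp_all <;> split_ifs <;> omega

theorem pvRank_stage_iff (t : String) (r : List (String × String)) (h : pvNormA r ≠ t) :
    (pvRank t r = 1 ↔ pvNormA r = "hard") ∧ (pvRank t r = 2 ↔ pvNormA r = "clay") ∧
    (pvRank t r = 3 ↔ pvNormA r = "grass") ∧ (pvRank t r = 4 ↔ pvNormA r = "best of 3") ∧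
    (pvRank t r = 5 ↔ pvNormA r = "best of 5") := by
  unfold pvRank pvNormB pvNormA at *
  split_ifs <;> simp_all

-- the characterization shared by both programs: first row of minimal rank
theorem A_eq_find (t : String) (b : List (String × String))
    (rest : List (List (String × String))) :
    (match pvFindSplit t (b :: rest) with
     | some r => some r
     | none =>
       match pvPrioLoop (b :: rest) ["hard", "clay", "grass", "best of 3", "best of 5"] with
       | some r => some r
       | none => (b :: rest).head?) =
    (b :: rest).find? (fun r => decide (pvRank t r = pvMinR t (b :: rest))) := by
  set rows := b :: rest with hrows
  have hne : rows ≠ [] := by simp [hrows]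
  -- stage 0: the target scan is find? (rank = 0)
  have h0 : pvFindSplit t rows = rows.find? (fun r => decide (pvRank t r = 0)) := by
    rw [pvFindSplit_eq_find?]
    exact find?_congr_mem rows (fun a _ => by
      simp only [decide_eq_decide]; exact (pvRank_zero_iff t a).symm)
  cases hf0 : rows.find? (fun r => decide (pvRank t r = 0)) with
  | some x =>
    have hm : pvMinR t rows = 0 := by
      have hx := List.find?_some hf0
      have hmem := List.mem_of_find?_eq_some hf0
      simp only [decide_eq_true_eq] at hx
      have := pvMinR_le_of_mem (t := t) hmem
      omega
    rw [h0, hf0, hm, hf0]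
  | none =>
    have H0 : ∀ r ∈ rows, pvNormA r ≠ t := by
      intro r hr hc
      have := List.find?_eq_none.mp hf0 r hr
      simp only [decide_eq_true_eq] at this
      exact this ((pvRank_zero_iff t r).mpr hc)
    have H0' : ∀ r ∈ rows, pvRank t r ≠ 0 := by
      intro r hr hc; exact H0 r hr ((pvRank_zero_iff t r).mp hc)
    rw [h0, hf0]
    -- each priority stage is find? (rank = i)
    have stage : ∀ (n : String) (v : Nat),
        (∀ r, pvNormA r ≠ t → (pvRank t r = v ↔ pvNormA r = n)) →
        pvFindSplit n rows = rows.find? (fun r => decide (pvRank t r = v)) := by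
      intro n v hiff
      rw [pvFindSplit_eq_find?]
      refine (find?_congr_mem rows (fun a ha => ?_)).symm
      simp only [decide_eq_decide]
      exact hiff a (H0 a ha)
    have hiff1 : ∀ r, pvNormA r ≠ t → (pvRank t r = 1 ↔ pvNormA r = "hard") :=
      fun r h => (pvRank_stage_iff t r h).1
    have hiff2 : ∀ r, pvNormA r ≠ t → (pvRank t r = 2 ↔ pvNormA r = "clay") :=
      fun r h => (pvRank_stage_iff t r h).2.1
    have hiff3 : ∀ r, pvNormA r ≠ t → (pvRank t r = 3 ↔ pvNormA r = "grass") :=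
      fun r h => (pvRank_stage_iff t r h).2.2.1
    have hiff4 : ∀ r, pvNormA r ≠ t → (pvRank t r = 4 ↔ pvNormA r = "best of 3") :=
      fun r h => (pvRank_stage_iff t r h).2.2.2.1
    have hiff5 : ∀ r, pvNormA r ≠ t → (pvRank t r = 5 ↔ pvNormA r = "best of 5") :=
      fun r h => (pvRank_stage_iff t r h).2.2.2.2
    simp only [pvPrioLoop]
    rw [stage "hard" 1 hiff1]
    cases hf1 : rows.find? (fun r => decide (pvRank t r = 1)) with
    | some x =>
      have hx := List.find?_some hf1
      have hmem := List.mem_of_find?_eq_some hf1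
      simp only [decide_eq_true_eq] at hx
      have hle := pvMinR_le_of_mem (t := t) hmem
      obtain ⟨rm, hrm, hrk⟩ := pvMinR_mem (t := t) hne
      have := H0' rm hrm
      have hm : pvMinR t rows = 1 := by omega
      rw [hm, hf1]
    | none =>
      have H1 : ∀ r ∈ rows, pvRank t r ≠ 1 := by
        intro r hr
        have := List.find?_eq_none.mp hf1 r hr
        simpa using this
      rw [stage "clay" 2 hiff2]
      cases hf2 : rows.find? (fun r => decide (pvRank t r = 2)) with
      | some x =>
        have hx := List.find?_some hf2
        have hmem := List.mem_of_find?_eq_some hf2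
        simp only [decide_eq_true_eq] at hx
        have hle := pvMinR_le_of_mem (t := t) hmem
        obtain ⟨rm, hrm, hrk⟩ := pvMinR_mem (t := t) hne
        have := H0' rm hrm; have := H1 rm hrm
        have hm : pvMinR t rows = 2 := by omega
        rw [hm, hf2]
      | none =>
        have H2 : ∀ r ∈ rows, pvRank t r ≠ 2 := by
          intro r hr; have := List.find?_eq_none.mp hf2 r hr; simpa using this
        rw [stage "grass" 3 hiff3]
        cases hf3 : rows.find? (fun r => decide (pvRank t r = 3)) with
        | some x =>
          have hx := List.find?_some hf3
          have hmem := List.mem_of_find?_eq_some hf3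
          simp only [decide_eq_true_eq] at hx
          have hle := pvMinR_le_of_mem (t := t) hmem
          obtain ⟨rm, hrm, hrk⟩ := pvMinR_mem (t := t) hne
          have := H0' rm hrm; have := H1 rm hrm; have := H2 rm hrm
          have hm : pvMinR t rows = 3 := by omega
          rw [hm, hf3]
        | none =>
          have H3 : ∀ r ∈ rows, pvRank t r ≠ 3 := by
            intro r hr; have := List.find?_eq_none.mp hf3 r hr; simpa using this
          rw [stage "best of 3" 4 hiff4]
          cases hf4 : rows.find? (fun r => decide (pvRank t r = 4)) with
          | some x =>
            have hx := List.find?_some hf4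
            have hmem := List.mem_of_find?_eq_some hf4
            simp only [decide_eq_true_eq] at hx
            have hle := pvMinR_le_of_mem (t := t) hmem
            obtain ⟨rm, hrm, hrk⟩ := pvMinR_mem (t := t) hne
            have := H0' rm hrm; have := H1 rm hrm; have := H2 rm hrm; have := H3 rm hrm
            have hm : pvMinR t rows = 4 := by omega
            rw [hm, hf4]
          | none =>
            have H4 : ∀ r ∈ rows, pvRank t r ≠ 4 := by
              intro r hr; have := List.find?_eq_none.mp hf4 r hr; simpa using this
            rw [stage "best of 5" 5 hiff5]
            cases hf5 : rows.find? (fun r => decide (pvRank t r = 5)) with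
            | some x =>
              have hx := List.find?_some hf5
              have hmem := List.mem_of_find?_eq_some hf5
              simp only [decide_eq_true_eq] at hx
              have hle := pvMinR_le_of_mem (t := t) hmem
              obtain ⟨rm, hrm, hrk⟩ := pvMinR_mem (t := t) hne
              have := H0' rm hrm; have := H1 rm hrm; have := H2 rm hrm
              have := H3 rm hrm; have := H4 rm hrm
              have hm : pvMinR t rows = 5 := by omega
              rw [hm, hf5]
            | none =>
              have H5 : ∀ r ∈ rows, pvRank t r ≠ 5 := by
                intro r hr; have := List.find?_eq_none.mp hf5 r hr; simpa using this
              -- every row has rank 6; the fallback rows[0] is the first such row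
              have h6 : ∀ r ∈ rows, pvRank t r = 6 := by
                intro r hr
                have := pvRank_le t r
                have := H0' r hr; have := H1 r hr; have := H2 r hr
                have := H3 r hr; have := H4 r hr; have := H5 r hr
                omega
              have hm : pvMinR t rows = 6 := by
                obtain ⟨rm, hrm, hrk⟩ := pvMinR_mem (t := t) hne
                rw [← hrk, h6 rm hrm]
              rw [hm, hrows,
                List.find?_cons_of_pos (by simp [h6 b (by simp [hrows])])]
              rfl

theorem pvFoldFind {α : Type} (f : α → Nat) (hf : ∀ a, f a ≤ 6) :
    ∀ (rest : List α) (b : α),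
      (b :: rest).find? (fun r => decide (f r = pvMinF f (b :: rest))) =
      some ((rest.foldl
          (fun acc row =>
            let r := f row
            if r < acc.2 then (row, r) else acc)
          (b, f b)).1)
  | [], b => by
    have h6 := hf b
    have hm : pvMinF f [b] = f b := by
      simp only [pvMinF, List.foldr]; omega
    rw [hm, List.find?_cons_of_pos (by simp), List.foldl_nil]
  | x :: rest, b => by
    have hminx : pvMinF f (x :: rest) ≤ f x := pvMinF_le_of_mem List.mem_cons_self
    have e1 := pvMinF_cons f b (x :: rest)
    have e2 := pvMinF_cons f x rest
    have e3 := pvMinF_cons f b rest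
    rw [List.foldl_cons]
    by_cases h : f x < f b
    · rw [if_pos h]
      have hm : pvMinF f (b :: x :: rest) = pvMinF f (x :: rest) := by omega
      rw [hm, List.find?_cons_of_neg (by simp only [decide_eq_true_eq]; omega)]
      exact pvFoldFind f hf rest x
    · rw [if_neg h]
      have hm : pvMinF f (b :: x :: rest) = pvMinF f (b :: rest) := by omega
      rw [hm]
      have ihb := pvFoldFind f hf rest b
      by_cases hb : f b = pvMinF f (b :: rest)
      · rw [List.find?_cons_of_pos (by simp only [decide_eq_true_eq]; omega)]
        rw [List.find?_cons_of_pos (by simp only [decide_eq_true_eq]; omega)] at ihb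
        exact ihb
      · have hlt : pvMinF f (b :: rest) < f b := by
          have : pvMinF f (b :: rest) ≤ f b := pvMinF_le_of_mem List.mem_cons_self
          omega
        rw [List.find?_cons_of_neg (by simp only [decide_eq_true_eq]; omega),
          List.find?_cons_of_neg (by simp only [decide_eq_true_eq]; omega)]
        rw [List.find?_cons_of_neg (by simp only [decide_eq_true_eq]; omega)] at ihb
        exact ihb

-- ===== VERDICT (by name: the statement is the Claim_ definition above) =====
theorem choose_surface_row_spec : Claim_equal_choose_surface_row := by
  intro rows surface _
  unfold Spec_choose_surface_row choose_surface_row choose_surface_row_alt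
  cases rows with
  | nil => simp
  | cons b rest =>
    simp only [if_neg (by simp : ¬ (b :: rest = []))]
    rw [A_eq_find]
    exact pvFoldFind (pvRank (PySem.Str.lower (PySem.Str.strip surface)))
      (pvRank_le _) rest b
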